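-- pv_equiv track=rewrite | github.com/imihajlow/ccpu | tools/natrix/ccpu/code.py | reserveStackFrame
-- ===== SOURCE A (Python) =====
-- MAX_INT_SIZE = 4
--
-- STACK_FRAME_SIZE = 0x800
--
-- def _phOverflow(p, s):
--     return (p & 0xff00) != ((p + s) & 0xff00)
--
-- def reserveStackFrame(vars, base):
--     p = 0
--     result = ""
--     for name, size in vars:
--         if size <= MAX_INT_SIZE:
--             # small sizes: make sure they don't cross the border
--             while _phOverflow(p, size):
--                 p += 1
--         else:
--             # big size: align by max possible int
--             mod = p % MAX_INT_SIZE
--             if mod != 0: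
--                 p += MAX_INT_SIZE - mod
--         if name is not None:
--             result += f".const {name} = 0x{base + p:04X}\n"
--         p += size
--         if p > STACK_FRAME_SIZE:
--             raise ValueError("stack frame overflow")
--     return result
-- ===== SOURCE B (Python) =====
-- MAX_INT_SIZE = 4
--
-- STACK_FRAME_SIZE = 0x800
--
--
-- def reserveStackFrame(variables, base):
--     p = 0
--     parts = []
--     for name, size in variables:
--         if size <= MAX_INT_SIZE:
--             # keep a small object inside one 256-byte page: start a new page if it would cross
--             if (p & 0xff) + size > 0xff:
--                 p = (p & 0xff00) + 0x100
--         else: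
--             # align a big object to MAX_INT_SIZE
--             p += -p % MAX_INT_SIZE
--         if name is not None:
--             parts.append(f".const {name} = 0x{base + p:04X}\n")
--         p += size
--         if p > STACK_FRAME_SIZE:
--             raise ValueError("stack frame overflow")
--     return "".join(parts)
-- ===== Notes on version B (the rewrite author's own statement) =====
-- stated objective: simpler
-- what changed: replaced the iterative one-byte-at-a-time page-alignment while loop by a single closed-form snap to the next page start (and the mod-4 branch by '-p % 4'), accumulating lines in a list joined once; Pre_ excludes inputs where A raises on frame overflow and lists containing a negative-size variable, which are outside the allocator's natural domain (a size is a byte count) and where A's while loop either diverges or moves the offset by an accident of page masking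
-- outside the precondition, e.g. on reserveStackFrame([('x', -1)], 0): A returns '.const x = 0x0001\n', B returns '.const x = 0x0000\n'
import Mathlib
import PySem

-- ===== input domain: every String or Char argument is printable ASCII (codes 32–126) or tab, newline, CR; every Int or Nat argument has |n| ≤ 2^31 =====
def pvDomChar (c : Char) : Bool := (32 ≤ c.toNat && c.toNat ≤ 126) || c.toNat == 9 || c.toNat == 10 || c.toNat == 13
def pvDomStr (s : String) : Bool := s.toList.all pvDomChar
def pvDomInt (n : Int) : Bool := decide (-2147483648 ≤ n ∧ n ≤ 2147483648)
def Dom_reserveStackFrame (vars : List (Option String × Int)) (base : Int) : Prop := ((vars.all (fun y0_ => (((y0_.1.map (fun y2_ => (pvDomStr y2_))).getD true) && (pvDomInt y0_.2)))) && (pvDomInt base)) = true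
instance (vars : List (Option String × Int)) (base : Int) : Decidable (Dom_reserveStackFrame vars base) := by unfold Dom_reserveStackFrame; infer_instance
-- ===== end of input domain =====

-- B replaces A's one-byte-at-a-time page-alignment while loop by a closed-form snap to the next
-- page start and joins the emitted lines once instead of repeated string concatenation.


-- ===== PORT A =====
-- shared formatting helpers: exact port of f".const {name} = 0x{v:04X}\n" (incl. Python's sign-in-width rule)
def pvHexChar (n : Nat) : Char :=
  (['0','1','2','3','4','5','6','7','8','9','A','B','C','D','E','F']).getD n '0'

def pvHexNat (n : Nat) : List Char :=
  if h : n < 16 then [pvHexChar n]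
  else pvHexNat (n / 16) ++ [pvHexChar (n % 16)]
decreasing_by exact Nat.div_lt_self (by omega) (by omega)

def pvFmt04X (v : Int) : String :=
  if v < 0 then
    String.ofList ('-' :: (List.replicate (3 - (pvHexNat (-v).toNat).length) '0' ++ pvHexNat (-v).toNat))
  else
    String.ofList (List.replicate (4 - (pvHexNat v.toNat).length) '0' ++ pvHexNat v.toNat)

def pvConstLine (name : String) (v : Int) : String :=
  ".const " ++ name ++ " = 0x" ++ pvFmt04X v ++ "\n"

def MAX_INT_SIZE : Int := 4
def STACK_FRAME_SIZE : Int := 0x800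

-- _phOverflow(p, s)
def phOverflow (p s : Int) : Bool :=
  !(PySem.Int.band p 0xff00 == PySem.Int.band (p + s) 0xff00)

-- A's "while _phOverflow(p, size): p += 1"; fuel 256 covers every terminating run (≤ 255 iterations)
def alignWhile : Nat → Int → Int → Int
  | 0, p, _ => p
  | fuel + 1, p, s => if phOverflow p s then alignWhile fuel (p + 1) s else p

-- A's loop; none = "raise ValueError(\"stack frame overflow\")"
def loopA (base : Int) : List (Option String × Int) → Int → String → Option String
  | [], _, result => some result
  | (name, size) :: rest, p, result =>
    let p1 : Int :=
      if size ≤ MAX_INT_SIZE then alignWhile 256 p size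
      else
        let m := PySem.Int.mod p MAX_INT_SIZE
        if m ≠ 0 then p + (MAX_INT_SIZE - m) else p
    let result1 :=
      match name with
      | some n => result ++ pvConstLine n (base + p1)
      | none => result
    let p2 := p1 + size
    if p2 > STACK_FRAME_SIZE then none else loopA base rest p2 result1

def reserveStackFrame (vars : List (Option String × Int)) (base : Int) : String :=
  (loopA base vars 0 "").getD ""

-- ===== PORT B =====
-- B's page snap: "if (p & 0xff) + size > 0xff: p = (p & 0xff00) + 0x100"
def alignSmall (p size : Int) : Int :=
  if PySem.Int.band p 0xff + size > 0xff then PySem.Int.band p 0xff00 + 0x100 else p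

-- B's loop accumulating the lines in a list; none = "raise ValueError(\"stack frame overflow\")"
def loopB (base : Int) : List (Option String × Int) → Int → List String → Option (List String)
  | [], _, parts => some parts
  | (name, size) :: rest, p, parts =>
    let p1 : Int :=
      if size ≤ MAX_INT_SIZE then alignSmall p size
      else p + PySem.Int.mod (-p) MAX_INT_SIZE
    let parts1 :=
      match name with
      | some n => parts ++ [pvConstLine n (base + p1)]
      | none => parts
    let p2 := p1 + size
    if p2 > STACK_FRAME_SIZE then none else loopB base rest p2 parts1

def reserveStackFrame_alt (vars : List (Option String × Int)) (base : Int) : String :=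
  match loopB base vars 0 [] with
  | some parts => PySem.Str.join "" parts
  | none => ""

-- ===== PRECONDITION & SPEC =====
-- Pre_ excludes the inputs on which A raises ValueError (running offset exceeds STACK_FRAME_SIZE)
-- and lists containing a negative-size variable: a size is a byte count, so negative sizes are
-- outside the allocator's natural domain — there A's while loop diverges for size ≤ -256 and
-- otherwise moves the offset forward by an accident of the 8-bit page masking;
-- the offset recurrence is restated arithmetically here, independent of both ports.
def preStep (p size : Int) : Int :=
  (if size ≤ 4 then (if 255 < p % 256 + size then p - p % 256 + 256 else p)
   else p + (4 - p % 4) % 4) + size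

def preOk : Int → List (Option String × Int) → Bool
  | _, [] => true
  | p, (_, size) :: rest =>
    0 ≤ size && (decide (preStep p size ≤ 2048) && preOk (preStep p size) rest)

def Pre_reserveStackFrame (vars : List (Option String × Int)) (base : Int) : Prop :=
  preOk 0 vars = true
instance (vars : List (Option String × Int)) (base : Int) : Decidable (Pre_reserveStackFrame vars base) := by unfold Pre_reserveStackFrame; infer_instance

def pvWitness_reserveStackFrame : (List (Option String × Int)) × Int :=
  ([(some "a", 3), (none, 2), (some "b", 7)], 192)

def Spec_reserveStackFrame (vars : List (Option String × Int)) (base : Int) (out : String) : Prop := out = reserveStackFrame_alt vars base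
instance (vars : List (Option String × Int)) (base : Int) (out : String) : Decidable (Spec_reserveStackFrame vars base out) := by unfold Spec_reserveStackFrame; infer_instance

-- ===== CLAIM (what is proved, stated in full; the proofs are below) =====
def Claim_equal_reserveStackFrame : Prop := ∀ (vars : List (Option String × Int)) (base : Int), Dom_reserveStackFrame vars base → Pre_reserveStackFrame vars base → Spec_reserveStackFrame vars base (reserveStackFrame vars base)

-- ===== LEMMAS AND PROOFS =====
set_option maxRecDepth 8000 in
theorem band_ff00_nat : ∀ q : Nat, q < 11 → ∀ r : Nat, r < 256 → ((256 * q + r) &&& 0xff00) = 256 * q := by decide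

set_option maxRecDepth 8000 in
theorem band_ff_nat : ∀ q : Nat, q < 11 → ∀ r : Nat, r < 256 → ((256 * q + r) &&& 0xff) = r := by decide

theorem band_ff00_int (p : Int) (h0 : 0 ≤ p) (h1 : p < 2816) :
    PySem.Int.band p 0xff00 = p - p % 256 := by
  rw [PySem.Int.band_of_nonneg h0 (by norm_num)]
  have h := band_ff00_nat (p.toNat / 256) (by omega) (p.toNat % 256) (by omega)
  rw [Nat.div_add_mod] at h
  have e : (0xff00 : Int).toNat = 65280 := rfl
  rw [e, h]
  omega

theorem band_ff_int (p : Int) (h0 : 0 ≤ p) (h1 : p < 2816) :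
    PySem.Int.band p 0xff = p % 256 := by
  rw [PySem.Int.band_of_nonneg h0 (by norm_num)]
  have h := band_ff_nat (p.toNat / 256) (by omega) (p.toNat % 256) (by omega)
  rw [Nat.div_add_mod] at h
  have e : (0xff : Int).toNat = 255 := rfl
  rw [e, h]
  omega

-- arithmetic form of the aligned offset for small sizes
def snapN (p s : Int) : Int :=
  if 255 < p % 256 + s then p - p % 256 + 256 else p

theorem ovf_iff (p s : Int) (hp : 0 ≤ p) (hp2 : p ≤ 2304) (hs : 0 ≤ s) (hs4 : s ≤ 4) :
    phOverflow p s = true ↔ 255 < p % 256 + s := by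
  unfold phOverflow
  rw [band_ff00_int p hp (by omega), band_ff00_int (p + s) (by omega) (by omega)]
  simp only [Bool.not_eq_eq_eq_not, Bool.not_true, beq_eq_false_iff_ne, ne_eq]
  constructor <;> intro h <;> omega

theorem snapN_ge (p s : Int) : p ≤ snapN p s := by
  unfold snapN; split_ifs <;> omega

theorem alignWhile_eq (fuel : Nat) (s : Int) (hs : 0 ≤ s) (hs4 : s ≤ 4) :
    ∀ p : Int, 0 ≤ p → p ≤ 2304 → snapN p s ≤ 2304 → (snapN p s - p).toNat ≤ fuel →
    alignWhile fuel p s = snapN p s := by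
  induction fuel with
  | zero =>
    intro p hp hp2 hsn hf
    have := snapN_ge p s
    simp only [alignWhile]
    omega
  | succ n ih =>
    intro p hp hp2 hsn hf
    by_cases hov : phOverflow p s = true
    · have hcond := (ovf_iff p s hp hp2 hs hs4).mp hov
      have hlt : p < snapN p s := by
        unfold snapN at *; split_ifs at * <;> omega
      have heq : snapN (p + 1) s = snapN p s := by
        unfold snapN at *; split_ifs at * <;> omega
      simp only [alignWhile, hov, if_true]
      rw [ih (p + 1) (by omega) (by omega) (by rw [heq]; omega) (by rw [heq]; omega), heq]
    · have hcond : ¬ 255 < p % 256 + s :=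
        fun h => hov ((ovf_iff p s hp hp2 hs hs4).mpr h)
      have hsp : snapN p s = p := by
        unfold snapN; split_ifs <;> omega
      simp only [alignWhile, Bool.not_eq_true] at hov ⊢
      rw [hov]
      simp [hsp]

theorem alignSmall_eq (p s : Int) (hp : 0 ≤ p) (hp2 : p ≤ 2304) :
    alignSmall p s = snapN p s := by
  simp only [alignSmall, snapN]
  rw [band_ff_int p hp (by omega), band_ff00_int p hp (by omega)]

theorem chars_join_append (xs : List (List Char)) (c : List Char) :
    PySem.Chars.join [] (xs ++ [c]) = PySem.Chars.join [] xs ++ c := by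
  induction xs with
  | nil => simp [PySem.Chars.join_nil, PySem.Chars.join_singleton]
  | cons h t ih =>
    cases t with
    | nil => simp [PySem.Chars.join_singleton, PySem.Chars.join_cons_cons]
    | cons a b =>
      show PySem.Chars.join [] (h :: a :: (b ++ [c])) = _
      rw [PySem.Chars.join_cons_cons, PySem.Chars.join_cons_cons]
      simp
      exact ih

theorem join_append_singleton (l : List String) (s : String) :
    PySem.Str.join "" (l ++ [s]) = PySem.Str.join "" l ++ s := by
  apply String.toList_injective
  simp [PySem.Str.toList_join, chars_join_append]

theorem loop_eq (base : Int) : ∀ (vars : List (Option String × Int)) (p : Int)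
    (parts : List String), 0 ≤ p → p ≤ 2048 → preOk p vars = true →
    loopA base vars p (PySem.Str.join "" parts) =
      (loopB base vars p parts).map (PySem.Str.join "") := by
  intro vars
  induction vars with
  | nil => intro p parts _ _ _; simp [loopA, loopB]
  | cons hd rest ih =>
    obtain ⟨name, size⟩ := hd
    intro p parts hp hp2 hok
    simp only [preOk, Bool.and_eq_true, decide_eq_true_eq] at hok
    obtain ⟨h1, h2, h3⟩ := hok
    by_cases hsz : size ≤ (4 : Int)
    · -- small branch: the while loop and the closed-form snap both are snapN
      have hsn : snapN p size ≤ 2304 := by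
        unfold snapN; split_ifs <;> omega
      have hfu : (snapN p size - p).toNat ≤ 256 := by
        unfold snapN; split_ifs <;> omega
      have hA : alignWhile 256 p size = snapN p size :=
        alignWhile_eq 256 size h1 hsz p hp (by omega) hsn hfu
      have hB : alignSmall p size = snapN p size := alignSmall_eq p size hp (by omega)
      have hstep : preStep p size = snapN p size + size := by
        unfold preStep snapN; rw [if_pos hsz]
      have hp2nn : 0 ≤ snapN p size + size := by
        unfold snapN; split_ifs <;> omega
      rw [hstep] at h2 h3
      cases name with
      | none =>
        simp only [loopA, loopB, MAX_INT_SIZE, STACK_FRAME_SIZE, if_pos hsz, hA, hB]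
        rw [if_neg (by omega : ¬ snapN p size + size > 2048), if_neg (by omega : ¬ snapN p size + size > 2048)]
        exact ih (snapN p size + size) parts hp2nn (by omega) h3
      | some n =>
        simp only [loopA, loopB, MAX_INT_SIZE, STACK_FRAME_SIZE, if_pos hsz, hA, hB]
        rw [if_neg (by omega : ¬ snapN p size + size > 2048), if_neg (by omega : ¬ snapN p size + size > 2048)]
        rw [← join_append_singleton]
        exact ih (snapN p size + size) (parts ++ [pvConstLine n (base + snapN p size)]) hp2nn (by omega) h3
    · -- big branch: both mod-4 alignments agree
      have hstep : preStep p size = p + (4 - p % 4) % 4 + size := by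
        unfold preStep; rw [if_neg hsz]
      have hAB : (if PySem.Int.mod p 4 ≠ 0 then p + (4 - PySem.Int.mod p 4) else p)
          = p + (4 - p % 4) % 4 := by
        simp only [PySem.Int.mod_eq_emod_of_pos (by norm_num : (0:Int) < 4)]
        split_ifs <;> omega
      have hAB2 : p + PySem.Int.mod (-p) 4 = p + (4 - p % 4) % 4 := by
        simp only [PySem.Int.mod_eq_emod_of_pos (by norm_num : (0:Int) < 4)]
        omega
      have hp2nn : 0 ≤ p + (4 - p % 4) % 4 + size := by omega
      rw [hstep] at h2 h3
      cases name with
      | none =>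
        simp only [loopA, loopB, MAX_INT_SIZE, STACK_FRAME_SIZE, if_neg hsz, hAB, hAB2]
        rw [if_neg (by omega : ¬ p + (4 - p % 4) % 4 + size > 2048), if_neg (by omega : ¬ p + (4 - p % 4) % 4 + size > 2048)]
        exact ih _ parts hp2nn (by omega) h3
      | some n =>
        simp only [loopA, loopB, MAX_INT_SIZE, STACK_FRAME_SIZE, if_neg hsz, hAB, hAB2]
        rw [if_neg (by omega : ¬ p + (4 - p % 4) % 4 + size > 2048), if_neg (by omega : ¬ p + (4 - p % 4) % 4 + size > 2048)]
        rw [← join_append_singleton]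
        exact ih _ (parts ++ [pvConstLine n (base + (p + (4 - p % 4) % 4))]) hp2nn (by omega) h3

-- ===== VERDICT (by name: the statement is the Claim_ definition above) =====
theorem reserveStackFrame_spec : Claim_equal_reserveStackFrame := by
  intro vars base _ hpre
  unfold Spec_reserveStackFrame reserveStackFrame reserveStackFrame_alt
  have h := loop_eq base vars 0 [] (by omega) (by omega) hpre
  have hnil : PySem.Str.join "" ([] : List String) = "" := rfl
  rw [hnil] at h
  rw [h]
  cases loopB base vars 0 [] <;> simp
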